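-- pv_equiv track=rewrite | github.com/SixingChen028/recurrent-meta-reasoning | eyeplan/modules/utils.py | relationship
-- ===== SOURCE A (Python) =====
-- def relationship(child_dict, node1, node2):
--     """
--     A function for testing the relationship of two nodes in a tree.
--     """
--
--     if node1 == node2:
--         return 'self'
--     elif node1 in child_dict.keys() and node2 in child_dict[node1]:
--         return 'child'
--     elif node2 in child_dict.keys() and node1 in child_dict[node2]:
--         return 'parent'
--     else:
--         for parent, children in child_dict.items():
--             if node1 in children and node2 in children:
--                 return 'sibling'
--     return 'others'
-- ===== SOURCE B (Python) =====
-- def relationship(child_dict, node1, node2):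
--     parents_of = {}
--     for parent, children in child_dict.items():
--         for child in children:
--             parents_of.setdefault(child, set()).add(parent)
--     if node1 == node2:
--         return 'self'
--     if node1 in parents_of.get(node2, set()):
--         return 'child'
--     if node2 in parents_of.get(node1, set()):
--         return 'parent'
--     if parents_of.get(node1, set()) & parents_of.get(node2, set()):
--         return 'sibling'
--     return 'others'
-- ===== Notes on version B (the rewrite author's own statement) =====
-- stated objective: alternative
-- what changed: Replaces A's direct key lookups plus a linear scan over all items for the sibling case by first building an inverted parent index (child -> set of parent keys) in one pass, then answering every relation question by pure lookups and a set intersection.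
import Mathlib
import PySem

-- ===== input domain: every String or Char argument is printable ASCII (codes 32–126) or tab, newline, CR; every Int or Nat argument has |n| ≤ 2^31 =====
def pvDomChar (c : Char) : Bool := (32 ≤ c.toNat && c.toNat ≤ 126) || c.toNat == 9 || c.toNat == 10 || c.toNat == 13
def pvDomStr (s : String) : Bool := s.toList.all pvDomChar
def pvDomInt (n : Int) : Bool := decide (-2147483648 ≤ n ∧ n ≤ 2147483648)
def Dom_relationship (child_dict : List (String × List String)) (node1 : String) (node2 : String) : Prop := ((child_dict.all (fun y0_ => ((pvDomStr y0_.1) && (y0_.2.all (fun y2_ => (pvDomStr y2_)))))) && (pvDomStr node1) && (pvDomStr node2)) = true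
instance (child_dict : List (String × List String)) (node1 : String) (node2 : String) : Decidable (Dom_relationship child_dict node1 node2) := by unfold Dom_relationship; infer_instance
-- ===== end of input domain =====

-- B replaces A's direct lookups + linear sibling scan by an inverted child->parents index; alternative structure, same cost.

-- ===== PORT A =====
-- the trailing for-loop of A: scan items for a common parent
def sibScan (items : List (String × List String)) (node1 : String) (node2 : String) : String :=
  match items with
  | [] => "others"
  | (_, children) :: rest =>
    if children.contains node1 && children.contains node2 then "sibling"
    else sibScan rest node1 node2

def relationship (child_dict : List (String × List String)) (node1 : String) (node2 : String) : String :=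
  let d := PySem.Dict.ofList child_dict
  if node1 == node2 then "self"
  else if d.contains node1 && (d.getD node1 []).contains node2 then "child"
  else if d.contains node2 && (d.getD node2 []).contains node1 then "parent"
  else sibScan d.items node1 node2

-- ===== PORT B =====
-- parents_of: for each child, the set of parent keys (B's first loop)
def buildParents (items : List (String × List String)) : PySem.Dict String (PySem.Set String) :=
  items.foldl
    (fun pd p => p.2.foldl (fun pd' c => pd'.modify c PySem.Set.empty (fun s => PySem.Set.add s p.1)) pd)
    PySem.Dict.empty

def relationship_alt (child_dict : List (String × List String)) (node1 : String) (node2 : String) : String :=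
  let d := PySem.Dict.ofList child_dict
  let parents := buildParents d.items
  if node1 == node2 then "self"
  else if (parents.getD node2 PySem.Set.empty).contains node1 then "child"
  else if (parents.getD node1 PySem.Set.empty).contains node2 then "parent"
  else if !(PySem.Set.inter (parents.getD node1 PySem.Set.empty) (parents.getD node2 PySem.Set.empty)).isEmpty then "sibling"
  else "others"

-- ===== PRECONDITION & SPEC =====
def Spec_relationship (child_dict : List (String × List String)) (node1 : String) (node2 : String) (out : String) : Prop := out = relationship_alt child_dict node1 node2
instance (child_dict : List (String × List String)) (node1 : String) (node2 : String) (out : String) : Decidable (Spec_relationship child_dict node1 node2 out) := by unfold Spec_relationship; infer_instance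

-- ===== CLAIM (what is proved, stated in full; the proofs are below) =====
def Claim_equal_relationship : Prop := ∀ (child_dict : List (String × List String)) (node1 : String) (node2 : String), Dom_relationship child_dict node1 node2 → Spec_relationship child_dict node1 node2 (relationship child_dict node1 node2)

-- ===== LEMMAS AND PROOFS =====

-- inner loop of buildParents
lemma mem_getD_innerFold (cs : List String) (k : String) (pd : PySem.Dict String (PySem.Set String)) (c x : String) :
    x ∈ (cs.foldl (fun pd' c' => pd'.modify c' PySem.Set.empty (fun s => PySem.Set.add s k)) pd).getD c PySem.Set.empty ↔
      x ∈ pd.getD c PySem.Set.empty ∨ (x = k ∧ c ∈ cs) := by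
  induction cs generalizing pd with
  | nil => simp
  | cons c0 rest ih =>
    simp only [List.foldl_cons, ih, PySem.Dict.getD_modify, List.mem_cons]
    by_cases h : c = c0
    · subst h
      simp only [if_true, true_or, and_true, PySem.Set.mem_add]
      tauto
    · simp only [if_neg h]
      have hc : (c = c0 ∨ c ∈ rest) ↔ c ∈ rest := by tauto
      rw [hc]

lemma mem_getD_buildParents (items : List (String × List String)) (c x : String) :
    x ∈ (buildParents items).getD c PySem.Set.empty ↔ ∃ p ∈ items, p.1 = x ∧ c ∈ p.2 := by
  unfold buildParents
  have gen : ∀ (pd : PySem.Dict String (PySem.Set String)),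
      x ∈ (items.foldl (fun pd p => p.2.foldl (fun pd' c' => pd'.modify c' PySem.Set.empty (fun s => PySem.Set.add s p.1)) pd) pd).getD c PySem.Set.empty ↔
        x ∈ pd.getD c PySem.Set.empty ∨ ∃ p ∈ items, p.1 = x ∧ c ∈ p.2 := by
    induction items with
    | nil => simp
    | cons p rest ih =>
      intro pd
      simp only [List.foldl_cons, ih, mem_getD_innerFold, List.mem_cons]
      constructor
      · rintro ((h | ⟨rfl, hc⟩) | ⟨q, hq, h1, h2⟩)
        · exact Or.inl h
        · exact Or.inr ⟨p, Or.inl rfl, rfl, hc⟩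
        · exact Or.inr ⟨q, Or.inr hq, h1, h2⟩
      · rintro (h | ⟨q, (rfl | hq), h1, h2⟩)
        · exact Or.inl (Or.inl h)
        · exact Or.inl (Or.inr ⟨h1.symm, h2⟩)
        · exact Or.inr ⟨q, hq, h1, h2⟩
  simpa using gen PySem.Dict.empty


lemma parents_mem_iff (cd : List (String × List String)) (a b : String) :
    a ∈ (buildParents (PySem.Dict.ofList cd).items).getD b PySem.Set.empty ↔
      ((PySem.Dict.ofList cd).contains a && ((PySem.Dict.ofList cd).getD a []).contains b) = true := by
  rw [mem_getD_buildParents]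
  simp only [Bool.and_eq_true, List.contains_iff_mem]
  constructor
  · rintro ⟨⟨k, cs⟩, hmem, rfl, hb⟩
    have hnd : (PySem.Dict.ofList cd).keys.Nodup := PySem.Dict.nodup_keys_ofList cd
    have hg := PySem.Dict.getD_of_mem_items (d := PySem.Dict.ofList cd) (d0 := []) hmem hnd
    refine ⟨?_, by simpa [hg] using hb⟩
    have hv := PySem.Dict.get?_of_mem_items (d := PySem.Dict.ofList cd) hmem hnd
    rw [PySem.Dict.contains_eq_isSome_get?, hv]; rfl
  · rintro ⟨hc, hb⟩
    have hs : ∃ v, (PySem.Dict.ofList cd).get? a = some v := by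
      rw [PySem.Dict.contains_eq_isSome_get?] at hc
      exact Option.isSome_iff_exists.mp hc
    obtain ⟨v, hv⟩ := hs
    refine ⟨(a, v), ?_, rfl, ?_⟩
    · exact PySem.Dict.mem_items_of_get?_eq_some (d := PySem.Dict.ofList cd) hv
    · have hgd : (PySem.Dict.ofList cd).getD a [] = v := PySem.Dict.getD_of_get?_eq_some _ [] hv
      simpa [hgd] using hb

-- A's sibling scan finds a common parent iff one exists among the items
lemma sibScan_eq_sibling_iff (items : List (String × List String)) (n1 n2 : String) :
    sibScan items n1 n2 = (if ∃ p ∈ items, n1 ∈ p.2 ∧ n2 ∈ p.2 then "sibling" else "others") := by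
  induction items with
  | nil => simp [sibScan]
  | cons p rest ih =>
    simp only [sibScan, Bool.and_eq_true, List.contains_iff_mem, ih]
    by_cases h : n1 ∈ p.2 ∧ n2 ∈ p.2
    · rw [if_pos h, if_pos ⟨p, List.mem_cons_self, h⟩]
    · rw [if_neg h]
      have hiff : (∃ q ∈ p :: rest, n1 ∈ q.2 ∧ n2 ∈ q.2) ↔ (∃ q ∈ rest, n1 ∈ q.2 ∧ n2 ∈ q.2) := by
        constructor
        · rintro ⟨q, hq, hh⟩
          rcases List.mem_cons.mp hq with h' | h'
          · exact absurd (by rwa [h'] at hh) h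
          · exact ⟨q, h', hh⟩
        · rintro ⟨q, hq, hh⟩
          exact ⟨q, List.mem_cons_of_mem _ hq, hh⟩
      simp only [hiff]

-- B's intersection of parent sets is non-empty iff a common parent exists among the items
lemma inter_nonempty_iff (cd : List (String × List String)) (n1 n2 : String) :
    (!(PySem.Set.inter ((buildParents (PySem.Dict.ofList cd).items).getD n1 PySem.Set.empty)
        ((buildParents (PySem.Dict.ofList cd).items).getD n2 PySem.Set.empty)).isEmpty) = true ↔
      ∃ p ∈ (PySem.Dict.ofList cd).items, n1 ∈ p.2 ∧ n2 ∈ p.2 := by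
  simp only [Bool.not_eq_true', List.isEmpty_eq_false_iff_exists_mem]
  constructor
  · rintro ⟨x, hx⟩
    rw [PySem.Set.mem_inter] at hx
    obtain ⟨h1, h2⟩ := hx
    rw [mem_getD_buildParents] at h1 h2
    obtain ⟨p, hp, hpx, hp1⟩ := h1
    obtain ⟨q, hq, hqx, hq2⟩ := h2
    have hnd : (PySem.Dict.ofList cd).keys.Nodup := PySem.Dict.nodup_keys_ofList cd
    have e1 := PySem.Dict.get?_of_mem_items (d := PySem.Dict.ofList cd) (k := p.1) (v := p.2) (by simpa using hp) hnd
    have e2 := PySem.Dict.get?_of_mem_items (d := PySem.Dict.ofList cd) (k := q.1) (v := q.2) (by simpa using hq) hnd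
    rw [hpx] at e1; rw [hqx] at e2
    have hv : p.2 = q.2 := by rw [e1] at e2; exact Option.some.inj e2
    exact ⟨p, hp, hp1, hv ▸ hq2⟩
  · rintro ⟨p, hp, h1, h2⟩
    refine ⟨p.1, ?_⟩
    rw [PySem.Set.mem_inter, mem_getD_buildParents, mem_getD_buildParents]
    exact ⟨⟨p, hp, rfl, h1⟩, ⟨p, hp, rfl, h2⟩⟩

-- ===== VERDICT (by name: the statement is the Claim_ definition above) =====
theorem relationship_spec : Claim_equal_relationship := by
  intro cd n1 n2 _
  unfold Spec_relationship
  simp only [relationship, relationship_alt]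
  have hcont : ∀ a b : String,
      ((buildParents (PySem.Dict.ofList cd).items).getD b PySem.Set.empty).contains a =
        ((PySem.Dict.ofList cd).contains a && ((PySem.Dict.ofList cd).getD a []).contains b) := by
    intro a b
    rw [Bool.eq_iff_iff, PySem.Set.contains_iff]
    exact parents_mem_iff cd a b
  rw [hcont n1 n2, hcont n2 n1]
  by_cases hself : (n1 == n2) = true
  · rw [if_pos hself, if_pos hself]
  · rw [if_neg hself, if_neg hself]
    by_cases hc : ((PySem.Dict.ofList cd).contains n1 && ((PySem.Dict.ofList cd).getD n1 []).contains n2) = true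
    · rw [if_pos hc, if_pos hc]
    · rw [if_neg hc, if_neg hc]
      by_cases hp : ((PySem.Dict.ofList cd).contains n2 && ((PySem.Dict.ofList cd).getD n2 []).contains n1) = true
      · rw [if_pos hp, if_pos hp]
      · rw [if_neg hp, if_neg hp, sibScan_eq_sibling_iff]
        by_cases hs : ∃ p ∈ (PySem.Dict.ofList cd).items, n1 ∈ p.2 ∧ n2 ∈ p.2
        · rw [if_pos hs, if_pos ((inter_nonempty_iff cd n1 n2).mpr hs)]
        · rw [if_neg hs, if_neg (fun h => hs ((inter_nonempty_iff cd n1 n2).mp h))]
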